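-- pv_equiv track=rewrite | github.com/CillianMyles/advent-of-code | 2025/python/day06/main.py | _sign_spans
-- ===== SOURCE A (Python) =====
-- def _sign_spans(line: str) -> list[tuple[int, int, str]]:
--     """
--     Returns [(start_idx, end_idx, sign_char), ...] in left-to-right order,
--     where end_idx is inclusive.
--     """
--     positions = [(i, ch) for i, ch in enumerate(line) if ch != " "]
--     if not positions:
--         return []
--
--     width = len(line)
--     spans: list[tuple[int, int, str]] = []
--     for idx, (start, sign) in enumerate(positions):
--         end = (positions[idx + 1][0] - 1) if idx + 1 < len(positions) else (width - 1)
--         spans.append((start, end, sign))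
--     return spans
-- ===== SOURCE B (Python) =====
-- def _sign_spans(line: str) -> list[tuple[int, int, str]]:
--     """
--     Single pass: keep the last-seen non-space char as `pending` and close its
--     span when the next non-space char (or the end of the line) is reached.
--     """
--     spans: list[tuple[int, int, str]] = []
--     pending = None  # (start_idx, sign_char) of the still-open span
--     for i, ch in enumerate(line):
--         if ch != " ":
--             if pending is not None:
--                 spans.append((pending[0], i - 1, pending[1]))
--             pending = (i, ch)
--     if pending is not None:
--         spans.append((pending[0], len(line) - 1, pending[1]))
--     return spans
-- ===== Notes on version B (the rewrite author's own statement) =====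
-- stated objective: simpler
-- what changed: Replaced the precomputed positions list plus idx+1 lookahead indexing by a single streaming pass that keeps the last non-space char pending and closes its span at the next non-space char or at end of line.
import Mathlib
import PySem

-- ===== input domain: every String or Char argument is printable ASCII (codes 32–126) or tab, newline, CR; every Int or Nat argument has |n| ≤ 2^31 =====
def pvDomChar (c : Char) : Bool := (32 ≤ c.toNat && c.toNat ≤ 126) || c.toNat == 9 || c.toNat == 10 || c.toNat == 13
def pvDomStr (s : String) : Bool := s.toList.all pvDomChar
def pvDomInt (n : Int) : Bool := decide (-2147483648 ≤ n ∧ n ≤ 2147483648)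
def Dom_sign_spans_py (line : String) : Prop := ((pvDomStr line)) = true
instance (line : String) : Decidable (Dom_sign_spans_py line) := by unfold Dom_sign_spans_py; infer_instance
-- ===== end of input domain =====

-- B replaces A's positions list with lookahead by a one-pass scan holding the open span; objective: simpler.

-- ===== PORT A =====
def sign_spans_py (line : String) : List (Int × Int × String) :=
  let positions := (PySem.List.enumerate line.toList).filter (fun p => p.2 != ' ')
  if positions = [] then []
  else
    let width : Int := (line.toList.length : Int)
    (PySem.List.enumerate positions).foldl (fun spans q =>
      spans ++ [(q.2.1,
        (if q.1 + 1 < (positions.length : Int)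
         then (PySem.List.pyGetD positions (q.1 + 1) (0, ' ')).1 - 1
         else width - 1),
        String.mk [q.2.2])]) []

-- ===== PORT B =====
def sign_spans_py_alt (line : String) : List (Int × Int × String) :=
  let width : Int := (line.toList.length : Int)
  let st := (PySem.List.enumerate line.toList).foldl
    (fun (st : List (Int × Int × String) × Option (Int × Char)) p =>
      if p.2 != ' ' then
        match st.2 with
        | some pend => (st.1 ++ [(pend.1, p.1 - 1, String.mk [pend.2])], some (p.1, p.2))
        | none => (st.1, some (p.1, p.2))
      else st) ([], none)
  match st.2 with
  | some pend => st.1 ++ [(pend.1, width - 1, String.mk [pend.2])]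
  | none => st.1

-- ===== PRECONDITION & SPEC =====
def Spec_sign_spans_py (line : String) (out : List (Int × Int × String)) : Prop := out = sign_spans_py_alt line
instance (line : String) (out : List (Int × Int × String)) : Decidable (Spec_sign_spans_py line out) := by unfold Spec_sign_spans_py; infer_instance

-- ===== CLAIM (what is proved, stated in full; the proofs are below) =====
def Claim_equal_sign_spans_py : Prop := ∀ (line : String), Dom_sign_spans_py line → Spec_sign_spans_py line (sign_spans_py line)

-- ===== LEMMAS AND PROOFS =====

/-- Reference: the spans produced from a positions list `ps`, closing the last span at `w-1`. -/
def pvChain (w : Int) : List (Int × Char) → List (Int × Int × String)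
  | [] => []
  | (s, c) :: rest =>
    match rest with
    | [] => [(s, w - 1, String.mk [c])]
    | (t, _) :: _ => (s, t - 1, String.mk [c]) :: pvChain w rest

theorem pvChainA (w : Int) (ps : List (Int × Char)) :
    ∀ (n k : Nat), k + n = ps.length →
      (PySem.List.enumerate (ps.drop k) (k : Int)).map (fun q =>
        (q.2.1,
          (if q.1 + 1 < (ps.length : Int)
           then (PySem.List.pyGetD ps (q.1 + 1) (0, ' ')).1 - 1
           else w - 1),
          String.mk [q.2.2])) = pvChain w (ps.drop k) := by
  intro n
  induction n with
  | zero =>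
    intro k hk
    have h : ps.drop k = [] := List.drop_eq_nil_of_le (by omega)
    simp [h, PySem.List.enumerate_nil, pvChain]
  | succ n ih =>
    intro k hk
    have hk' : k < ps.length := by omega
    have hdrop : ps.drop k = ps[k] :: ps.drop (k + 1) := List.drop_eq_getElem_cons hk'
    rw [hdrop, PySem.List.enumerate_cons, List.map_cons]
    have htail := ih (k + 1) (by omega)
    by_cases htl : k + 1 < ps.length
    · have hdrop2 : ps.drop (k + 1) = ps[k + 1] :: ps.drop (k + 2) := List.drop_eq_getElem_cons htl
      rw [hdrop2] at htail ⊢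
      have hcast : ((k + 1 : Nat) : Int) = (k : Int) + 1 := by push_cast; ring
      rw [hcast] at htail
      have hget : PySem.List.pyGetD ps ((k : Int) + 1) (0, ' ') = ps[k + 1] := by
        rw [← hcast, PySem.List.pyGetD_natCast]
        exact List.getD_eq_getElem ps (0, ' ') htl
      have hlt : ((k : Int) + 1) < (ps.length : Int) := by exact_mod_cast htl
      rw [htail]
      simp [hget, hlt, pvChain]
    · have hnil : ps.drop (k + 1) = [] := List.drop_eq_nil_of_le (by omega)
      rw [hnil] at htail ⊢
      have hcast : ((k + 1 : Nat) : Int) = (k : Int) + 1 := by push_cast; ring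
      rw [hcast] at htail
      have hlt : ¬ ((k : Int) + 1 < (ps.length : Int)) := by
        omega
      rw [htail]
      simp [hlt, pvChain]

theorem pvChainB (w : Int) :
    ∀ (cs : List Char) (i : Int) (acc : List (Int × Int × String)) (pend : Option (Int × Char)),
      (match ((PySem.List.enumerate cs i).foldl
        (fun (st : List (Int × Int × String) × Option (Int × Char)) p =>
          if p.2 != ' ' then
            match st.2 with
            | some pend => (st.1 ++ [(pend.1, p.1 - 1, String.mk [pend.2])], some (p.1, p.2))
            | none => (st.1, some (p.1, p.2))
          else st) (acc, pend)) with
       | (a, some q) => a ++ [(q.1, w - 1, String.mk [q.2])]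
       | (a, none) => a) =
      acc ++ (match pend with
        | none => pvChain w (((PySem.List.enumerate cs i)).filter (fun p => p.2 != ' '))
        | some q => pvChain w (q :: ((PySem.List.enumerate cs i)).filter (fun p => p.2 != ' '))) := by
  intro cs
  induction cs with
  | nil =>
    intro i acc pend
    cases pend <;> simp [PySem.List.enumerate_nil, pvChain]
  | cons c cs ih =>
    intro i acc pend
    rw [PySem.List.enumerate_cons]
    simp only [List.foldl_cons, List.filter_cons]
    by_cases hc : (c != ' ') = true
    · simp only [hc, if_pos]
      cases pend with
      | none =>
        rw [ih]
      | some q =>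
        rw [ih]
        simp [pvChain, List.append_assoc]
    · simp only [hc]
      simp only [Bool.false_eq_true, if_false]
      exact ih (i + 1) acc pend

-- ===== VERDICT (by name: the statement is the Claim_ definition above) =====
theorem sign_spans_py_spec : Claim_equal_sign_spans_py := by
  intro line _
  unfold Spec_sign_spans_py
  have hB := pvChainB ((line.toList.length : Int)) line.toList 0 [] none
  simp only [List.nil_append] at hB
  have hA := pvChainA ((line.toList.length : Int))
      ((PySem.List.enumerate line.toList).filter (fun p => p.2 != ' '))
      ((PySem.List.enumerate line.toList).filter (fun p => p.2 != ' ')).length 0 (Nat.zero_add _)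
  simp only [List.drop_zero, Nat.cast_zero] at hA
  simp only [sign_spans_py, sign_spans_py_alt]
  rw [PySem.List.foldl_append_singleton_eq_map, List.nil_append, hA]
  rcases h : ((PySem.List.enumerate line.toList).foldl
      (fun (st : List (Int × Int × String) × Option (Int × Char)) p =>
        if p.2 != ' ' then
          match st.2 with
          | some pend => (st.1 ++ [(pend.1, p.1 - 1, String.mk [pend.2])], some (p.1, p.2))
          | none => (st.1, some (p.1, p.2))
        else st) ([], none)) with ⟨a, pnd⟩
  rw [h] at hB
  rw [h]
  cases pnd with
  | none =>
    simp only [] at hB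
    split_ifs with h2
    · rw [h2] at hB
      simp only [pvChain] at hB
      exact hB.symm
    · exact hB.symm
  | some q =>
    simp only [] at hB
    split_ifs with h2
    · rw [h2] at hB
      simp only [pvChain] at hB
      exact absurd hB (by simp)
    · exact hB.symm
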